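-- pv_equiv track=rewrite | github.com/ngorski9/rotation-invariant-neural-networks-with-polynomials | moment_invariant_tools/construct_contractions.py | relabel_index_order_deep
-- ===== SOURCE A (Python) =====
-- import itertools
--
-- def relabel_index_order_deep(index_order):
--     """Relabel the indices so that new indices appear from 0...n"""
--     index_map = {}
--     counter = iter(itertools.count())
--     result = []
--     for group in index_order:
--         group_result = []
--         for i in group:
--             if i not in index_map:
--                 # Number them as they come up
--                 index_map[i] = next(counter)
--             group_result.append(index_map[i])
--         result.append(tuple(sorted(group_result)))
--
--     return tuple(result)
-- ===== SOURCE B (Python) =====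
-- import itertools
--
-- def relabel_index_order_deep(index_order):
--     """Relabel the indices so that new indices appear from 0...n"""
--     flat = list(itertools.chain.from_iterable(index_order))
--     return tuple(
--         tuple(sorted(len(set(flat[:flat.index(i)])) for i in group))
--         for group in index_order
--     )
-- ===== Notes on version B (the rewrite author's own statement) =====
-- stated objective: alternative
-- what changed: B keeps no state at all: instead of A's incrementally-built dict + counter, it computes each label independently by a closed form, len(set(flat[:flat.index(i)])) = number of distinct values before i's first occurrence in the flattened input, then sorts each mapped group.
import Mathlib
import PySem

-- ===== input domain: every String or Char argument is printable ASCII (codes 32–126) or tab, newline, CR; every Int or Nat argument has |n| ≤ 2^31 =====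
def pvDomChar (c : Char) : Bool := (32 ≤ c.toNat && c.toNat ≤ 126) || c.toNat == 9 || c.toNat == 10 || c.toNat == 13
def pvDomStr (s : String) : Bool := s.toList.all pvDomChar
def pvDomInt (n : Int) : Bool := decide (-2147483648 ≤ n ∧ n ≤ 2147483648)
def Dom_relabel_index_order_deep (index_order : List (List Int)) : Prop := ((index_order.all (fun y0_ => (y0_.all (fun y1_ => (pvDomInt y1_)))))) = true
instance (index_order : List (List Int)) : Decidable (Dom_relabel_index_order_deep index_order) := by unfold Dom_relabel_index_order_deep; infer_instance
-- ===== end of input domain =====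

-- B is stateless: instead of A's incrementally-built dict + counter, each label is the
-- closed form "number of distinct values before this value's first occurrence in the
-- flattened input" (objective: alternative; same results, no mapping structure).

-- ===== PORT A =====
def relabel_index_order_deep (index_order : List (List Int)) : List (List Int) :=
  -- state: (index_map, counter, result); the inner fold also threads group_result
  (index_order.foldl
    (fun (st : PySem.Dict Int Int × Int × List (List Int)) group =>
      let g := group.foldl
        (fun (gst : PySem.Dict Int Int × Int × List Int) i =>
          match gst.1.get? i with
          | none => (gst.1.insert i gst.2.1, gst.2.1 + 1, gst.2.2 ++ [gst.2.1])
          | some v => (gst.1, gst.2.1, gst.2.2 ++ [v]))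
        (st.1, st.2.1, [])
      (g.1, g.2.1, st.2.2 ++ [PySem.List.sorted g.2.2 (fun x => x) false]))
    (PySem.Dict.empty, 0, [])).2.2

-- ===== PORT B =====
def relabel_index_order_deep_alt (index_order : List (List Int)) : List (List Int) :=
  let flat := index_order.flatten
  index_order.map (fun group =>
    PySem.List.sorted (group.map (fun i =>
      match PySem.List.index? flat i with
      | some n => ((PySem.Set.ofList (PySem.List.slice flat none (some (n : Int)))).length : Int)
      | none => 0  -- unreachable: every i of a group is in flat (Python's .index would raise there)
      )) (fun x => x) false)

-- ===== PRECONDITION & SPEC =====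
def Spec_relabel_index_order_deep (index_order : List (List Int)) (out : List (List Int)) : Prop := out = relabel_index_order_deep_alt index_order
instance (index_order : List (List Int)) (out : List (List Int)) : Decidable (Spec_relabel_index_order_deep index_order out) := by unfold Spec_relabel_index_order_deep; infer_instance

-- ===== CLAIM (what is proved, stated in full; the proofs are below) =====
def Claim_equal_relabel_index_order_deep : Prop := ∀ (index_order : List (List Int)), Dom_relabel_index_order_deep index_order → Spec_relabel_index_order_deep index_order (relabel_index_order_deep index_order)

-- ===== LEMMAS AND PROOFS =====

-- A's dict after processing key list s (nodup): maps each key to its position in s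
def pvTbl (s : List Int) : PySem.Dict Int Int :=
  (PySem.List.enumerate s).foldl (fun (d : PySem.Dict Int Int) p => d.insert p.2 p.1) PySem.Dict.empty

lemma pvTbl_append_singleton (s : List Int) (x : Int) :
    pvTbl (s ++ [x]) = (pvTbl s).insert x (s.length : Int) := by
  unfold pvTbl
  rw [PySem.List.enumerate_append, List.foldl_append]
  simp [PySem.List.enumerate_cons, PySem.List.enumerate_nil]

lemma get?_pvTbl (s : List Int) (hnd : s.Nodup) (i : Int) :
    (pvTbl s).get? i = if i ∈ s then some ((s.idxOf i : Nat) : Int) else none := by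
  induction s using List.reverseRecOn with
  | nil => simp [pvTbl, PySem.List.enumerate_nil, PySem.Dict.get?_empty]
  | append_singleton s x ih =>
    have hx : x ∉ s := by
      have h := List.nodup_append.mp hnd
      intro hm; exact h.2.2 x hm x (by simp) rfl
    have hnds : s.Nodup := (List.nodup_append.mp hnd).1
    rw [pvTbl_append_singleton]
    by_cases hxi : i = x
    · subst hxi
      rw [PySem.Dict.get?_insert_self]
      simp [List.idxOf_append_of_notMem hx, List.idxOf_cons_self]
    · rw [PySem.Dict.get?_insert_of_ne _ _ hxi, ih hnds]
      by_cases hmem : i ∈ s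
      · simp [hmem, List.idxOf_append_of_mem hmem]
      · have : i ∉ s ++ [x] := by simp [hmem, hxi]
        simp [hmem, this]

lemma prefix_update (s : List Int) (g : List Int) : s <+: PySem.Set.update s g := by
  induction g generalizing s with
  | nil => simp [PySem.Set.update_nil]
  | cons x g ih =>
    rw [PySem.Set.update_cons]
    refine List.IsPrefix.trans ?_ (ih _)
    rw [PySem.Set.add_eq_ite]
    split
    · exact List.prefix_rfl
    · exact ⟨[x], rfl⟩

lemma prefix_foldl_update (groups : List (List Int)) (s : List Int) :
    s <+: groups.foldl (fun t g => PySem.Set.update t g) s := by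
  induction groups generalizing s with
  | nil => exact List.prefix_rfl
  | cons g gs ih => exact (prefix_update s g).trans (ih _)

lemma nodup_updateP (s : List Int) (g : List Int) (hnd : s.Nodup) :
    (PySem.Set.update s g).Nodup := by
  induction g generalizing s with
  | nil => simpa [PySem.Set.update_nil]
  | cons x g ih =>
    rw [PySem.Set.update_cons]
    exact ih _ (PySem.Set.nodup_add _ _ hnd)

-- A's inner loop, characterized against a fixed global key list K
lemma inner_loop (K : List Int) (g : List Int) : ∀ (s : List Int) (gr : List Int),
    s.Nodup → PySem.Set.update s g <+: K →
    g.foldl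
      (fun (gst : PySem.Dict Int Int × Int × List Int) i =>
        match gst.1.get? i with
        | none => (gst.1.insert i gst.2.1, gst.2.1 + 1, gst.2.2 ++ [gst.2.1])
        | some v => (gst.1, gst.2.1, gst.2.2 ++ [v]))
      (pvTbl s, (s.length : Int), gr)
    = (pvTbl (PySem.Set.update s g), ((PySem.Set.update s g).length : Int),
       gr ++ g.map (fun i => ((K.idxOf i : Nat) : Int))) := by
  induction g with
  | nil => intro s gr _ _; simp [PySem.Set.update_nil]
  | cons x g ih =>
    intro s gr hnd hpre
    have hpre' : PySem.Set.update s (x :: g) <+: K := hpre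
    rw [PySem.Set.update_cons] at hpre' ⊢
    have hsK : PySem.Set.add s x <+: K := (prefix_update _ g).trans hpre'
    simp only [List.foldl_cons]
    by_cases hm : x ∈ s
    · have hadd : PySem.Set.add s x = s := PySem.Set.add_of_mem hm
      have hget : (pvTbl s).get? x = some ((s.idxOf x : Nat) : Int) := by
        rw [get?_pvTbl s hnd x]; simp [hm]
      have hsKpre : s <+: K := hadd ▸ hsK
      have hidx : K.idxOf x = s.idxOf x := (hsKpre.idxOf_eq_of_mem hm).symm
      simp only [hget, hadd]
      rw [ih s (gr ++ [((s.idxOf x : Nat) : Int)]) hnd (hadd ▸ hpre')]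
      simp [hidx]
    · have hadd : PySem.Set.add s x = s ++ [x] := PySem.Set.add_of_not_mem hm
      have hget : (pvTbl s).get? x = none := by rw [get?_pvTbl s hnd x]; simp [hm]
      have hnd' : (s ++ [x]).Nodup := by
        rw [List.nodup_append]
        refine ⟨hnd, List.nodup_singleton x, ?_⟩
        intro a ha b hb
        simp only [List.mem_singleton] at hb
        subst hb
        intro he; exact hm (he ▸ ha)
      have hidx : K.idxOf x = s.length := by
        have hxs : x ∈ s ++ [x] := by simp
        have h1 : (s ++ [x]).idxOf x = s.length := by
          rw [List.idxOf_append_of_notMem hm]; simp [List.idxOf_cons_self]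
        rw [← ((hadd ▸ hsK : (s ++ [x]) <+: K).idxOf_eq_of_mem hxs), h1]
      simp only [hget, hadd]
      have hins : (pvTbl s).insert x (s.length : Int) = pvTbl (s ++ [x]) :=
        (pvTbl_append_singleton s x).symm
      have hlen : (s.length : Int) + 1 = ((s ++ [x]).length : Int) := by simp
      rw [hins, hlen, ih (s ++ [x]) (gr ++ [(s.length : Int)]) hnd' (hadd ▸ hpre')]
      simp [hidx]

-- A's outer loop
lemma outer_loop (K : List Int) (groups : List (List Int)) : ∀ (s : List Int) (res : List (List Int)),
    s.Nodup → groups.foldl (fun t g => PySem.Set.update t g) s <+: K →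
    groups.foldl
      (fun (st : PySem.Dict Int Int × Int × List (List Int)) group =>
        let g := group.foldl
          (fun (gst : PySem.Dict Int Int × Int × List Int) i =>
            match gst.1.get? i with
            | none => (gst.1.insert i gst.2.1, gst.2.1 + 1, gst.2.2 ++ [gst.2.1])
            | some v => (gst.1, gst.2.1, gst.2.2 ++ [v]))
          (st.1, st.2.1, [])
        (g.1, g.2.1, st.2.2 ++ [PySem.List.sorted g.2.2 (fun x => x) false]))
      (pvTbl s, (s.length : Int), res)
    = (pvTbl (groups.foldl (fun t g => PySem.Set.update t g) s),
       ((groups.foldl (fun t g => PySem.Set.update t g) s).length : Int),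
       res ++ groups.map (fun g =>
         PySem.List.sorted (g.map (fun i => ((K.idxOf i : Nat) : Int))) (fun x => x) false)) := by
  induction groups with
  | nil => intro s res _ _; simp
  | cons g gs ih =>
    intro s res hnd hpre
    simp only [List.foldl_cons] at hpre ⊢
    have hpre1 : PySem.Set.update s g <+: K :=
      (prefix_foldl_update gs _).trans hpre
    rw [inner_loop K g s [] hnd hpre1]
    simp only [List.nil_append]
    rw [ih (PySem.Set.update s g)
      (res ++ [PySem.List.sorted (g.map (fun i => ((K.idxOf i : Nat) : Int))) (fun x => x) false])
      (nodup_updateP s g hnd) hpre]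
    simp

lemma foldl_update_eq_dedup (groups : List (List Int)) :
    groups.foldl (fun t g => PySem.Set.update t g) [] = PySem.List.dedup groups.flatten := by
  have h : ∀ (s : List Int), groups.foldl (fun t g => PySem.Set.update t g) s
      = PySem.Set.update s groups.flatten := by
    induction groups with
    | nil => intro s; simp [PySem.Set.update_nil]
    | cons g gs ih =>
      intro s
      simp only [List.foldl_cons, List.flatten_cons]
      rw [ih, PySem.Set.update_append]
  rw [h, PySem.Set.update_nil_left, PySem.List.dedup_eq_ofList]

-- B's closed form: distinct count of the prefix before v's first occurrence
-- equals v's position among the distinct elements (generalized over a seen-set s).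
lemma prefix_distinct_count (l : List Int) : ∀ (s : List Int) (v : Int), v ∈ l → v ∉ s →
    (PySem.Set.update s (l.take (l.idxOf v))).length = (PySem.Set.update s l).idxOf v := by
  induction l with
  | nil => intro s v hv _; simp at hv
  | cons x t ih =>
    intro s v hv hvs
    by_cases hvx : v = x
    · subst hvx
      rw [List.idxOf_cons_self]
      simp only [List.take_zero, PySem.Set.update_nil, PySem.Set.update_cons,
        PySem.Set.add_of_not_mem hvs]
      have hpre : (s ++ [v]) <+: PySem.Set.update (s ++ [v]) t := prefix_update _ _
      have hmem : v ∈ s ++ [v] := by simp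
      have h1 : (s ++ [v]).idxOf v = s.length := by
        rw [List.idxOf_append_of_notMem hvs]; simp [List.idxOf_cons_self]
      rw [← hpre.idxOf_eq_of_mem hmem, h1]
    · have hvt : v ∈ t := by
        rcases List.mem_cons.mp hv with h | h
        · exact absurd h hvx
        · exact h
      have hne : x ≠ v := fun h => hvx h.symm
      have hidx : (x :: t).idxOf v = t.idxOf v + 1 := by
        simp [hne]
      rw [hidx]
      simp only [List.take_succ_cons, PySem.Set.update_cons]
      have hvs' : v ∉ PySem.Set.add s x := by
        rw [PySem.Set.add_eq_ite]
        split
        · exact hvs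
        · simp [hvs, hvx]
      exact ih (PySem.Set.add s x) v hvt hvs'

lemma index?_of_mem (l : List Int) (v : Int) (h : v ∈ l) :
    PySem.List.index? l v = some (l.idxOf v) := by
  induction l with
  | nil => simp at h
  | cons x t ih =>
    by_cases hvx : x = v
    · subst hvx
      rw [PySem.List.index?_cons_self]
      simp [List.idxOf_cons_self]
    · have hvt : v ∈ t := by
        rcases List.mem_cons.mp h with h' | h'
        · exact absurd h'.symm hvx
        · exact h'
      rw [PySem.List.index?_cons_of_ne t hvx, ih hvt]
      simp [hvx]

-- ===== VERDICT (by name: the statement is the Claim_ definition above) =====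
theorem relabel_index_order_deep_spec : Claim_equal_relabel_index_order_deep := by
  unfold Claim_equal_relabel_index_order_deep
  intro io _
  unfold Spec_relabel_index_order_deep relabel_index_order_deep relabel_index_order_deep_alt
  set K := PySem.List.dedup io.flatten with hK
  have hKpre : io.foldl (fun t g => PySem.Set.update t g) [] <+: K := by
    rw [foldl_update_eq_dedup, hK]
  have h0 : (PySem.Dict.empty : PySem.Dict Int Int) = pvTbl [] := by
    simp [pvTbl, PySem.List.enumerate_nil]
  rw [show ((PySem.Dict.empty : PySem.Dict Int Int), (0 : Int), ([] : List (List Int)))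
      = (pvTbl [], (([] : List Int).length : Int), ([] : List (List Int))) by simp [h0]]
  rw [outer_loop K io [] [] List.nodup_nil hKpre]
  simp only [List.nil_append]
  apply List.map_congr_left
  intro g hg
  congr 1
  apply List.map_congr_left
  intro i hi
  have hiF : i ∈ io.flatten := List.mem_flatten.mpr ⟨g, hg, hi⟩
  rw [index?_of_mem io.flatten i hiF]
  simp only [PySem.List.slice_to_natCast]
  have hB := prefix_distinct_count io.flatten [] i hiF (by simp)
  rw [PySem.Set.update_nil_left] at hB
  have hKof : K = PySem.Set.ofList io.flatten := by
    rw [hK, PySem.List.dedup_eq_ofList]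
  rw [hKof]
  exact_mod_cast hB.symm
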